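-- pv_equiv track=rewrite | github.com/afedynitch/x4i3 | x4i3/exfor_utilities.py | chunkifyX4Request
-- ===== SOURCE A (Python) =====
-- def chunkifyX4Request(request):
--     """
--     Gizmo to break a raw Exfor request (in the form of a list of strings) into a list of Exfor entries (themselves just lists of strings)
--     @type  request: list of strings
--     @param request: Exfor Request to be chopped into Exfor Entries
--     @rtype: list of list of strings
--     @return: list of list of strings w/ innermost list of strings assumed to be Exfor Entries
--     """
--     if not isinstance(request, type([])):
--         raise TypeError
--
--     entries = []
--     inEntry = False
--     entry = []
--
--     for line in request:
--         if inEntry: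
--             entry.append(line)
--             if line[0:11].strip() == 'ENDENTRY':
--                 entries.append(entry)
--                 inEntry = False
--         else:
--             if line[0:11].strip() == 'ENTRY':
--                 inEntry = True
--                 entry = []
--                 entry.append(line)
--     return entries
-- ===== SOURCE B (Python) =====
-- def chunkifyX4Request(request):
--     """
--     Break a raw Exfor request (list of strings) into a list of Exfor entries.
--     Explicit index walk: find an ENTRY line, search forward for its ENDENTRY,
--     slice the block out, continue after it; an unterminated block is dropped.
--     """
--     if not isinstance(request, type([])):
--         raise TypeError
--
--     entries = []
--     n = len(request)
--     i = 0
--     while i < n: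
--         if request[i][0:11].strip() == 'ENTRY':
--             j = i + 1
--             while j < n and request[j][0:11].strip() != 'ENDENTRY':
--                 j += 1
--             if j < n:
--                 entries.append(request[i:j + 1])
--                 i = j + 1
--             else:
--                 break
--         else:
--             i += 1
--     return entries
-- ===== Notes on version B (the rewrite author's own statement) =====
-- stated objective: alternative
-- what changed: Replaces the inEntry-flag state machine that accumulates lines one by one into a mutable entry buffer with an explicit index walk that locates an ENTRY line, searches forward for the matching ENDENTRY, and slices the whole block out of the request at once.
import Mathlib
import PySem

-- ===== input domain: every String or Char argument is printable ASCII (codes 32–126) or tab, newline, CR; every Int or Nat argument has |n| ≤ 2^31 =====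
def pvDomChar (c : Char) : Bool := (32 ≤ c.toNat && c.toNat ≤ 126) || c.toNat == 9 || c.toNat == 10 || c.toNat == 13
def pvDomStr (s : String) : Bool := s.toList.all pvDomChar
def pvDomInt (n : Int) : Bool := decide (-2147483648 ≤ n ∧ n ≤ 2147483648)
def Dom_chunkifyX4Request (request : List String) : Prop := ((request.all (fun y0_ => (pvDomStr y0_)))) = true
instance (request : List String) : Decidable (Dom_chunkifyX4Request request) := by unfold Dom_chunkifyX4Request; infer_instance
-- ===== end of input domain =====

-- B replaces A's inEntry-flag state machine by an explicit forward search for the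
-- ENDENTRY line and slices each block out at once (alternative decomposition, same cost).

-- line[0:11].strip()  (shared by both Python versions verbatim)
def pvKey11 (l : String) : String :=
  PySem.Str.strip (PySem.Str.slice l none (some 11))

-- ===== PORT A =====
-- fold state: (entries, inEntry, entry)
def chunkifyX4Request (request : List String) : List (List String) :=
  (request.foldl
    (fun (st : List (List String) × Bool × List String) line =>
      let entries := st.1
      let inEntry := st.2.1
      let entry := st.2.2
      if inEntry then
        let entry := entry ++ [line]
        if pvKey11 line == "ENDENTRY" then (entries ++ [entry], false, entry)
        else (entries, true, entry)
      else
        if pvKey11 line == "ENTRY" then (entries, true, [line])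
        else (entries, false, entry))
    ([], false, [])).1

-- ===== PORT B =====
-- forward search from the line after ENTRY for the first ENDENTRY line:
-- returns (lines before it, the ENDENTRY line, the rest), or none if absent
def pvFindEnd : List String → Option (List String × String × List String)
  | [] => none
  | x :: xs =>
    if pvKey11 x == "ENDENTRY" then some ([], x, xs)
    else
      match pvFindEnd xs with
      | some (p, e, r) => some (x :: p, e, r)
      | none => none

theorem pvFindEnd_decomp : ∀ (xs : List String) p e r,
    pvFindEnd xs = some (p, e, r) → xs = p ++ e :: r := by
  intro xs
  induction xs with
  | nil => intro p e r h; simp [pvFindEnd] at h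
  | cons x xs ih =>
    intro p e r h
    by_cases hx : pvKey11 x == "ENDENTRY"
    · simp [pvFindEnd, hx] at h
      obtain ⟨hp, he, hr⟩ := h
      subst hp; subst he; subst hr; simp
    · simp [pvFindEnd, hx] at h
      cases hfe : pvFindEnd xs with
      | none => rw [hfe] at h; simp at h
      | some v =>
        obtain ⟨p', e', r'⟩ := v
        rw [hfe] at h
        simp at h
        obtain ⟨hp, he, hr⟩ := h
        subst hp; subst he; subst hr
        simpa using ih p' e' r' hfe

theorem pvFindEnd_rest_lt : ∀ (xs : List String) p e r,
    pvFindEnd xs = some (p, e, r) → r.length < xs.length := by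
  intro xs p e r h
  have := pvFindEnd_decomp xs p e r h
  subst this; simp; omega

-- walk the request: skip until an ENTRY line, then cut the block at its ENDENTRY
def pvChunkWalk : List String → List (List String)
  | [] => []
  | l :: rest =>
    if pvKey11 l == "ENTRY" then
      match hfe : pvFindEnd rest with
      | some (p, e, r) => (l :: (p ++ [e])) :: pvChunkWalk r
      | none => []
    else pvChunkWalk rest
  termination_by xs => xs.length
  decreasing_by
    · have := pvFindEnd_rest_lt rest p e r hfe; simp; omega
    · simp

def chunkifyX4Request_alt (request : List String) : List (List String) :=
  pvChunkWalk request

-- ===== PRECONDITION & SPEC =====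
def Spec_chunkifyX4Request (request : List String) (out : List (List String)) : Prop := out = chunkifyX4Request_alt request
instance (request : List String) (out : List (List String)) : Decidable (Spec_chunkifyX4Request request out) := by unfold Spec_chunkifyX4Request; infer_instance

-- ===== CLAIM (what is proved, stated in full; the proofs are below) =====
def Claim_equal_chunkifyX4Request : Prop := ∀ (request : List String), Dom_chunkifyX4Request request → Spec_chunkifyX4Request request (chunkifyX4Request request)

-- ===== LEMMAS AND PROOFS =====

theorem pvChunkWalk_cons (l : String) (rest : List String) :
    pvChunkWalk (l :: rest) =
      if pvKey11 l == "ENTRY" then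
        match pvFindEnd rest with
        | some (p, e, r) => (l :: (p ++ [e])) :: pvChunkWalk r
        | none => []
      else pvChunkWalk rest := by
  rw [pvChunkWalk]
  by_cases hx : pvKey11 l == "ENTRY"
  · rw [if_pos hx, if_pos hx]
    split
    · rename_i p e r hfe
      rw [hfe]
    · rename_i hfe
      rw [hfe]
  · rw [if_neg hx, if_neg hx]


-- A's fold body, named for the lemmas
def pvStepA (st : List (List String) × Bool × List String) (line : String) :
    List (List String) × Bool × List String :=
  let entries := st.1
  let inEntry := st.2.1
  let entry := st.2.2
  if inEntry then
    let entry := entry ++ [line]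
    if pvKey11 line == "ENDENTRY" then (entries ++ [entry], false, entry)
    else (entries, true, entry)
  else
    if pvKey11 line == "ENTRY" then (entries, true, [line])
    else (entries, false, entry)

theorem pvFoldA_eq (request : List String) :
    chunkifyX4Request request = (request.foldl pvStepA ([], false, [])).1 := by
  unfold chunkifyX4Request
  congr 1

-- while inEntry, A appends lines to `entry` until the first ENDENTRY line (= pvFindEnd)
theorem pvInsideLemma : ∀ (xs : List String) (es : List (List String)) (e : List String),
    (xs.foldl pvStepA (es, true, e)).1 =
      match pvFindEnd xs with
      | none => es
      | some (p, endl, r) =>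
          (r.foldl pvStepA (es ++ [e ++ (p ++ [endl])], false, e ++ (p ++ [endl]))).1 := by
  intro xs
  induction xs with
  | nil => intro es e; simp [pvFindEnd]
  | cons x xs ih =>
    intro es e
    by_cases hx : pvKey11 x == "ENDENTRY"
    · simp [pvFindEnd, hx, List.foldl_cons, pvStepA]
    · simp only [pvFindEnd, hx, List.foldl_cons]
      have hstep : pvStepA (es, true, e) x = (es, true, e ++ [x]) := by
        simp [pvStepA, hx]
      rw [hstep, ih es (e ++ [x])]
      cases hfe : pvFindEnd xs with
      | none => simp
      | some v =>
        obtain ⟨p, endl, r⟩ := v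
        simp only [Bool.false_eq_true, if_false]
        have : e ++ [x] ++ (p ++ [endl]) = e ++ (x :: p ++ [endl]) := by simp
        rw [this]

-- main correspondence, by strong induction on the length
theorem pvOutsideLemma : ∀ (n : Nat) (xs : List String), xs.length ≤ n →
    ∀ (es : List (List String)) (e : List String),
      (xs.foldl pvStepA (es, false, e)).1 = es ++ pvChunkWalk xs := by
  intro n
  induction n with
  | zero =>
    intro xs hlen es e
    have : xs = [] := List.eq_nil_of_length_eq_zero (by omega)
    subst this; simp [pvChunkWalk]
  | succ n ih =>
    intro xs hlen es e
    cases xs with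
    | nil => simp [pvChunkWalk]
    | cons x xs =>
      by_cases hx : pvKey11 x == "ENTRY"
      · have hstep : pvStepA (es, false, e) x = (es, true, [x]) := by
          simp [pvStepA, hx]
        simp only [List.foldl_cons]
        rw [hstep, pvInsideLemma xs es [x]]
        cases hfe : pvFindEnd xs with
        | none =>
          rw [pvChunkWalk_cons]
          simp [hx, hfe]
        | some v =>
          obtain ⟨p, endl, r⟩ := v
          have hr : r.length ≤ n := by
            have := pvFindEnd_rest_lt xs p endl r hfe
            simp at hlen; omega
          rw [pvChunkWalk_cons]
          simp only [hx, hfe, if_true]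
          rw [ih r hr]
          simp
      · have hstep : pvStepA (es, false, e) x = (es, false, e) := by
          simp [pvStepA, hx]
        simp only [List.foldl_cons]
        rw [hstep, ih xs (by simp at hlen; omega) es e]
        rw [pvChunkWalk_cons x xs]
        simp [hx]

-- ===== VERDICT (by name: the statement is the Claim_ definition above) =====
theorem chunkifyX4Request_spec : Claim_equal_chunkifyX4Request := by
  intro request _
  unfold Spec_chunkifyX4Request chunkifyX4Request_alt
  rw [pvFoldA_eq]
  simpa using pvOutsideLemma request.length request (le_refl _) [] []
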